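-- pv_equiv track=rewrite | github.com/Takahiro-Funahashi/Mahjong_Algorithm_Research | class_MJ_Haipai.py | toitsu_anko_ankan
-- ===== SOURCE A (Python) =====
-- import collections
--
-- def toitsu_anko_ankan(haipai_Set):
--     toustu = set()
--     anko = set()
--     ankan = set()
--     if 'haipai' in haipai_Set:
--         haipai = haipai_Set['haipai']
--         c = collections.Counter(haipai)
--         for k, v in c.items():
--             if v == 2:
--                 toustu.add(k)
--             if v == 3:
--                 anko.add(k)
--             if v == 4:
--                 ankan.add(k)
--
--     return toustu,anko,ankan
-- ===== SOURCE B (Python) =====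
-- def toitsu_anko_ankan(haipai_Set):
--     toustu = set()
--     anko = set()
--     ankan = set()
--     if 'haipai' in haipai_Set:
--         rest = haipai_Set['haipai']
--         while rest:
--             t = rest[0]
--             remainder = [x for x in rest if x != t]
--             n = len(rest) - len(remainder)
--             if n == 2:
--                 toustu.add(t)
--             elif n == 3:
--                 anko.add(t)
--             elif n == 4:
--                 ankan.add(t)
--             rest = remainder
--     return toustu, anko, ankan
-- ===== Notes on version B (the rewrite author's own statement) =====
-- stated objective: alternative
-- what changed: Replaces the Counter frequency map and its items() loop by a repeated-partition loop: each iteration strips every copy of the first remaining tile from the list and classifies that tile by how much the list shrank, so no count table or per-key count call exists.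
import Mathlib
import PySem

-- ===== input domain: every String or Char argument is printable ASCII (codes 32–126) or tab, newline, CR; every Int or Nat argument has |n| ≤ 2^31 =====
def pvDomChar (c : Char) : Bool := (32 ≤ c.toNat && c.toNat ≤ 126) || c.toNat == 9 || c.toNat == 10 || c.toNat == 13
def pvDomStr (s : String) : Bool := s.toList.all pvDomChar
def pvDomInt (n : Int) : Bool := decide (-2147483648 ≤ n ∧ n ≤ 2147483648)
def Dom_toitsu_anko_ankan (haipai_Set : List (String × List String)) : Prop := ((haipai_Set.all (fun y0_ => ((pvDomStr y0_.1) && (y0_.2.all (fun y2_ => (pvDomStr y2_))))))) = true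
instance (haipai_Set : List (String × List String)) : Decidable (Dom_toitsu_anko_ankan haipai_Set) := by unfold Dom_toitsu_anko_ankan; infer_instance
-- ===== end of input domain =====

-- B replaces A's Counter + items() pass by a repeated-partition loop (strip all copies of the
-- first remaining tile, classify it by how much the list shrank); same return value everywhere.

-- ===== PORT A =====
-- A's loop body over one (key, count) item of the Counter: three sequential ifs, as in A.
def pvStepA (s : PySem.Set String × PySem.Set String × PySem.Set String) (kv : String × Int) :
    PySem.Set String × PySem.Set String × PySem.Set String :=
  let s := if kv.2 == 2 then (PySem.Set.add s.1 kv.1, s.2.1, s.2.2) else s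
  let s := if kv.2 == 3 then (s.1, PySem.Set.add s.2.1 kv.1, s.2.2) else s
  if kv.2 == 4 then (s.1, s.2.1, PySem.Set.add s.2.2 kv.1) else s

def toitsu_anko_ankan (haipai_Set : List (String × List String)) : List String × List String × List String :=
  let toustu : PySem.Set String := PySem.Set.empty
  let anko : PySem.Set String := PySem.Set.empty
  let ankan : PySem.Set String := PySem.Set.empty
  if PySem.Dict.contains (PySem.Dict.mk haipai_Set) "haipai" then
    let haipai := (PySem.Dict.get? (PySem.Dict.mk haipai_Set) "haipai").getD []  -- guarded by contains: get? is some
    let c := PySem.Dict.counter haipai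
    c.items.foldl pvStepA (toustu, anko, ankan)
  else (toustu, anko, ankan)

-- ===== PORT B =====
-- B's classification of one tile t occurring n times: the if/elif chain of Source B.
def pvClassify (s : PySem.Set String × PySem.Set String × PySem.Set String) (t : String) (n : Int) :
    PySem.Set String × PySem.Set String × PySem.Set String :=
  if n == 2 then (PySem.Set.add s.1 t, s.2.1, s.2.2)
  else if n == 3 then (s.1, PySem.Set.add s.2.1 t, s.2.2)
  else if n == 4 then (s.1, s.2.1, PySem.Set.add s.2.2 t)
  else s

-- The while loop of Source B: strip all copies of the head tile, classify by the length drop.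
def pvPartLoop (rest : List String)
    (s : PySem.Set String × PySem.Set String × PySem.Set String) :
    PySem.Set String × PySem.Set String × PySem.Set String :=
  match rest with
  | [] => s
  | t :: tl =>
      let remainder := (t :: tl).filter (fun x => x != t)
      let n : Int := PySem.List.len (t :: tl) - PySem.List.len remainder
      pvPartLoop remainder (pvClassify s t n)
termination_by rest.length
decreasing_by
  simp only [List.filter_cons, bne_self_eq_false, List.length_cons]
  exact Nat.lt_succ_of_le (List.length_filter_le _ _)

def toitsu_anko_ankan_alt (haipai_Set : List (String × List String)) : List String × List String × List String :=
  let toustu : PySem.Set String := PySem.Set.empty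
  let anko : PySem.Set String := PySem.Set.empty
  let ankan : PySem.Set String := PySem.Set.empty
  if PySem.Dict.contains (PySem.Dict.mk haipai_Set) "haipai" then
    let haipai := (PySem.Dict.get? (PySem.Dict.mk haipai_Set) "haipai").getD []  -- guarded by contains: get? is some
    pvPartLoop haipai (toustu, anko, ankan)
  else (toustu, anko, ankan)

-- ===== PRECONDITION & SPEC =====
def Spec_toitsu_anko_ankan (haipai_Set : List (String × List String)) (out : List String × List String × List String) : Prop := out = toitsu_anko_ankan_alt haipai_Set
instance (haipai_Set : List (String × List String)) (out : List String × List String × List String) : Decidable (Spec_toitsu_anko_ankan haipai_Set out) := by unfold Spec_toitsu_anko_ankan; infer_instance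

-- ===== CLAIM =====
def Claim_equal_toitsu_anko_ankan : Prop := ∀ (haipai_Set : List (String × List String)), Dom_toitsu_anko_ankan haipai_Set → Spec_toitsu_anko_ankan haipai_Set (toitsu_anko_ankan haipai_Set)

-- ===== LEMMAS AND PROOFS =====

-- dedup commutes with filtering
theorem pv_ofList_filter (p : String → Bool) :
    ∀ (xs : List String), PySem.Set.ofList (xs.filter p) = (PySem.Set.ofList xs).filter p := by
  intro xs
  induction xs with
  | nil => rfl
  | cons x xs ih =>
      rw [PySem.Set.ofList_cons]
      by_cases hp : p x = true
      · rw [List.filter_cons_of_pos hp, PySem.Set.ofList_cons, ih]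
        simp only [List.filter_cons, hp, ite_true, PySem.Set.discard, List.filter_filter]
        congr 1
        · simp [Bool.and_comm]
      · rw [List.filter_cons_of_neg hp, ih]
        simp only [List.filter_cons, hp, PySem.Set.discard, List.filter_filter]
        apply List.filter_congr
        intro y _
        by_cases hy : y = x
        · subst hy; simp [hp]
        · simp [hy]

-- first-occurrence dedup, structurally: head, then dedup of the rest with the head removed
theorem pv_ofList_cons_filter (t : String) (tl : List String) :
    PySem.Set.ofList (t :: tl) = t :: PySem.Set.ofList (tl.filter (fun x => x != t)) := by
  rw [PySem.Set.ofList_cons, pv_ofList_filter]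
  rfl

-- the number of elements a partition step removes is the multiplicity of the removed tile
theorem pv_filter_len_count (t : String) (l : List String) :
    (l.filter (fun x => x != t)).length + List.count t l = l.length := by
  induction l with
  | nil => rfl
  | cons x xs ih =>
      by_cases hx : x = t
      · subst hx; simp; omega
      · simp [hx]; omega

-- the length drop of the partition step is the multiplicity of the head
theorem pv_len_drop_count (t : String) (tl : List String) :
    PySem.List.len (t :: tl) - PySem.List.len ((t :: tl).filter (fun x => x != t))
      = (List.count t (t :: tl) : Int) := by
  simp only [PySem.List.len]
  have h := pv_filter_len_count t (t :: tl)
  omega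

-- if/elif chain = A's three sequential ifs (2, 3, 4 are mutually exclusive)
theorem pv_classify_eq_stepA (s : PySem.Set String × PySem.Set String × PySem.Set String)
    (t : String) (n : Int) : pvClassify s t n = pvStepA s (t, n) := by
  unfold pvClassify pvStepA
  simp only [beq_iff_eq]
  split_ifs <;> first | rfl | omega

-- filtering out t does not change the multiplicity of any k ≠ t
theorem pv_count_filter_ne (t k : String) (l : List String) (hk : k ≠ t) :
    List.count k (l.filter (fun x => x != t)) = List.count k l := by
  rw [List.count_filter]
  simp [hk]

-- the partition loop computes A's fold over the (distinct key, multiplicity) pairs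
theorem pv_partLoop_eq (rest : List String)
    (s : PySem.Set String × PySem.Set String × PySem.Set String) :
    pvPartLoop rest s
      = (PySem.Set.ofList rest).foldl (fun s k => pvStepA s (k, (List.count k rest : Int))) s := by
  induction rest, s using pvPartLoop.induct with
  | case1 s => rw [pvPartLoop]; rfl
  | case2 s t tl rem n ih =>
      have hrem : rem = (t :: tl).filter (fun x => x != t) := rfl
      have hn : n = PySem.List.len (t :: tl) - PySem.List.len ((t :: tl).filter (fun x => x != t)) := by
        rw [← hrem]
      rw [hrem, hn] at ih
      rw [pvPartLoop]
      rw [ih, pv_ofList_cons_filter, List.foldl_cons, pv_classify_eq_stepA, pv_len_drop_count]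
      have h2 : (t :: tl).filter (fun x => x != t) = tl.filter (fun x => x != t) := by
        simp
      rw [h2]
      apply PySem.List.foldl_congr_mem
      intro acc k hkmem
      have hk : k ∈ tl.filter (fun x => x != t) := (PySem.Set.mem_ofList _ _).mp hkmem
      have hkt : k ≠ t := by
        have := List.of_mem_filter hk
        simpa using this
      rw [pv_count_filter_ne t k tl hkt]
      simp [Ne.symm hkt]

theorem toitsu_anko_ankan_eq (haipai_Set : List (String × List String)) :
    toitsu_anko_ankan haipai_Set = toitsu_anko_ankan_alt haipai_Set := by
  unfold toitsu_anko_ankan toitsu_anko_ankan_alt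
  split
  · simp only [PySem.Dict.items_counter, List.foldl_map, pv_partLoop_eq]
  · rfl

-- ===== VERDICT =====
theorem toitsu_anko_ankan_spec : Claim_equal_toitsu_anko_ankan := by
  intro hs _
  exact toitsu_anko_ankan_eq hs
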